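-- pv_equiv track=rewrite | github.com/bchwast/AGH-WDI | Kolokwia 20_21/k2_ex2.py | rec_div
-- ===== SOURCE A (Python) =====
-- def prime(num):
--     if num == 2 or num == 3:
--         return True
--     if num < 2 or num % 2 == 0 or num % 3 == 0:
--         return False
--
--     a = 5
--     while a * a <= num:
--         if num % a == 0:
--             return False
--         a += 2
--         if num % a == 0:
--             return False
--         a += 4
--
--     return True
--
-- def rec_div(num, nums, pieces, i):
--     if prime(num) and prime(pieces):
--         return True
--
--     if i > num:
--         return False
--
--     if prime(num % i):
--         if rec_div(num // i, [num % i] + nums, pieces + 1, 10):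
--             return True
--
--     return rec_div(num, [*nums], pieces, i * 10)
-- ===== SOURCE B (Python) =====
-- def prime(num):
--     if num == 2 or num == 3:
--         return True
--     if num < 2 or num % 2 == 0 or num % 3 == 0:
--         return False
--     a = 5
--     while a * a <= num:
--         if num % a == 0:
--             return False
--         a += 2
--         if num % a == 0:
--             return False
--         a += 4
--     return True
--
-- def rec_div(num, nums, pieces, i):
--     # top-down memoization on the state (n, p, j); nums never influences the result
--     cache = {}
--     def go(n, p, j):
--         key = (n, p, j)
--         if key in cache:
--             return cache[key]
--         if prime(n) and prime(p):
--             res = True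
--         elif j > n:
--             res = False
--         else:
--             res = (prime(n % j) and go(n // j, p + 1, 10)) or go(n, p, j * 10)
--         cache[key] = res
--         return res
--     return go(num, pieces, i)
-- ===== Notes on version B (the rewrite author's own statement) =====
-- stated objective: alternative
-- what changed: B replaces A's plain recursion (which re-solves the same (num, pieces, i) state once per path and threads an unused nums list) with top-down memoization on the state (num, pieces, i), solving each reachable state at most once.
import Mathlib
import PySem

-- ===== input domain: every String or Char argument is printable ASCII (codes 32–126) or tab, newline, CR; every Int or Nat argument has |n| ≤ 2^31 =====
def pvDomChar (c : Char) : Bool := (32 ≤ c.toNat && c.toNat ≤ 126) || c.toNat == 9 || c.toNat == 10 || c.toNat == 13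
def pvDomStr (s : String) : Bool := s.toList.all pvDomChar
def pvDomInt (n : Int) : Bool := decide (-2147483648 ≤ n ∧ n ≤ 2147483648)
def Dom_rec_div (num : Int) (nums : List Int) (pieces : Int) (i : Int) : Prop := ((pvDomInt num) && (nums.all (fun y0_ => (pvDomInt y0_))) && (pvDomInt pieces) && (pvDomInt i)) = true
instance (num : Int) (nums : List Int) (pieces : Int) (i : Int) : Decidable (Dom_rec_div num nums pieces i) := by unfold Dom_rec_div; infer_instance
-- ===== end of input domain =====

-- B memoizes the recursion on the state (num, pieces, i) and drops the unused nums
-- list: a cache answers repeated visits of the same state (same value).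

-- ===== PORT A =====
-- trial-division primality test, shared helper of A and B (port of the module's 'prime')
def primeAux (num a : Int) : Bool :=
  if h : a * a ≤ num then
    if PySem.Int.mod num a == 0 then false
    else if PySem.Int.mod num (a + 2) == 0 then false
    else primeAux num (a + 6)
  else true
termination_by (num + 1 - a).toNat
decreasing_by
  have : a ≤ num := by nlinarith [sq_nonneg a, sq_nonneg (a - 1)]
  omega

def prime (num : Int) : Bool :=
  if num == 2 || num == 3 then true
  else if num < 2 || PySem.Int.mod num 2 == 0 || PySem.Int.mod num 3 == 0 then false
  else primeAux num 5

-- recursion-depth fuel (ample for |num| ≤ 2^31); `none` = fuel exhausted, which the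
-- proofs below show never happens on Pre_ inputs
def pvFuel : Nat := 2 ^ 33

def recDivA : Nat → Int → List Int → Int → Int → Option Bool
  | 0, _, _, _, _ => none
  | f + 1, num, nums, pieces, i =>
    if prime num && prime pieces then some true
    else if i > num then some false
    else if prime (PySem.Int.mod num i) then
      match recDivA f (PySem.Int.floordiv num i) (PySem.Int.mod num i :: nums) (pieces + 1) 10 with
      | none => none
      | some true => some true
      | some false => recDivA f num nums pieces (i * 10)
    else recDivA f num nums pieces (i * 10)

def rec_div (num : Int) (nums : List Int) (pieces : Int) (i : Int) : Bool :=
  (recDivA pvFuel num nums pieces i).getD false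

-- ===== PORT B =====
-- 'go' of Source B: state-passing memo cache keyed by (n, p, j)
def goB : Nat → PySem.Dict (Int × Int × Int) Bool → Int → Int → Int →
    Option (Bool × PySem.Dict (Int × Int × Int) Bool)
  | 0, _, _, _, _ => none
  | f + 1, cache, n, p, j =>
    match PySem.Dict.get? cache (n, p, j) with
    | some v => some (v, cache)
    | none =>
      if prime n && prime p then some (true, cache.insert (n, p, j) true)
      else if j > n then some (false, cache.insert (n, p, j) false)
      else if prime (PySem.Int.mod n j) then
        match goB f cache (PySem.Int.floordiv n j) (p + 1) 10 with
        | none => none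
        | some (true, c1) => some (true, c1.insert (n, p, j) true)
        | some (false, c1) =>
          match goB f c1 n p (j * 10) with
          | none => none
          | some (r, c2) => some (r, c2.insert (n, p, j) r)
      else
        match goB f cache n p (j * 10) with
        | none => none
        | some (r, c2) => some (r, c2.insert (n, p, j) r)

def rec_div_alt (num : Int) (nums : List Int) (pieces : Int) (i : Int) : Bool :=
  match goB pvFuel PySem.Dict.empty num pieces i with
  | some (r, _) => r
  | none => false

-- ===== PRECONDITION & SPEC =====
-- Pre_ excludes exactly the inputs on which A does not return: i ≤ 0 with num ≥ i and
-- without the immediate prime/prime success, where A hits ZeroDivisionError (i = 0) or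
-- unbounded recursion / RecursionError (i < 0).
def Pre_rec_div (num : Int) (nums : List Int) (pieces : Int) (i : Int) : Prop :=
  1 ≤ i ∨ (2 ≤ num ∧ num.toNat.Prime ∧ 2 ≤ pieces ∧ pieces.toNat.Prime) ∨ num < i
instance (num : Int) (nums : List Int) (pieces : Int) (i : Int) : Decidable (Pre_rec_div num nums pieces i) := by unfold Pre_rec_div; infer_instance

def pvWitness_rec_div : Int × List Int × Int × Int := (12, [], 0, 10)

def Spec_rec_div (num : Int) (nums : List Int) (pieces : Int) (i : Int) (out : Bool) : Prop := out = rec_div_alt num nums pieces i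
instance (num : Int) (nums : List Int) (pieces : Int) (i : Int) (out : Bool) : Decidable (Spec_rec_div num nums pieces i out) := by unfold Spec_rec_div; infer_instance

-- ===== CLAIM (what is proved, stated in full; the proofs are below) =====
def Claim_equal_rec_div : Prop := ∀ (num : Int) (nums : List Int) (pieces : Int) (i : Int), Dom_rec_div num nums pieces i → Pre_rec_div num nums pieces i → Spec_rec_div num nums pieces i (rec_div num nums pieces i)

-- ===== LEMMAS AND PROOFS =====

theorem dvd_toNat_of_dvd {a x : Int} (ha : 0 ≤ a) (hx : 0 ≤ x) (h : a ∣ x) :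
    a.toNat ∣ x.toNat := by
  rw [← Int.toNat_of_nonneg ha, ← Int.toNat_of_nonneg hx] at h
  exact_mod_cast h

theorem not_small_dvd {x d : Int} (hx : 2 ≤ x) (hp : x.toNat.Prime) (h2 : 2 ≤ d)
    (hlt : d < x) : ¬ d ∣ x := by
  intro h
  have := hp.eq_one_or_self_of_dvd d.toNat (dvd_toNat_of_dvd (by omega) (by omega) h)
  omega

theorem primeAux_of_prime (x : Int) (hx : 2 ≤ x) (hp : x.toNat.Prime) :
    ∀ (a : Int), 5 ≤ a → primeAux x a = true := by
  suffices H : ∀ (k : Nat) (a : Int), (x + 1 - a).toNat ≤ k → 5 ≤ a → primeAux x a = true by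
    exact fun a h5 => H (x + 1 - a).toNat a le_rfl h5
  intro k
  induction k with
  | zero =>
    intro a hk h5
    have hxa : x + 1 ≤ a := by omega
    rw [primeAux, dif_neg]
    nlinarith
  | succ k ih =>
    intro a hk h5
    rw [primeAux]
    by_cases hle : a * a ≤ x
    · rw [dif_pos hle]
      have hax : a < x := by nlinarith
      have h2x : a + 2 < x := by nlinarith
      have h1 : ¬ a ∣ x := not_small_dvd hx hp (by omega) hax
      have h2 : ¬ (a + 2) ∣ x := not_small_dvd hx hp (by omega) h2x
      rw [if_neg (by simp [PySem.Int.mod_eq_zero_iff_dvd, h1]),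
          if_neg (by simp [PySem.Int.mod_eq_zero_iff_dvd, h2])]
      exact ih (a + 6) (by omega) (by omega)
    · rw [dif_neg hle]

theorem prime_of_prime {x : Int} (hx : 2 ≤ x) (hp : x.toNat.Prime) : prime x = true := by
  by_cases h23 : x = 2 ∨ x = 3
  · unfold prime
    rw [if_pos (by simp; omega)]
  · have h4 : x ≠ 4 := by
      intro h
      rw [show x.toNat = 4 by omega] at hp
      norm_num at hp
    have h5 : 5 ≤ x := by omega
    have h2d : ¬ (2:Int) ∣ x := not_small_dvd hx hp (by omega) (by omega)
    have h3d : ¬ (3:Int) ∣ x := not_small_dvd hx hp (by omega) (by omega)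
    unfold prime
    rw [if_neg (by simp; omega),
        if_neg (by
          simp only [Bool.or_eq_true, decide_eq_true_eq, beq_iff_eq,
            PySem.Int.mod_eq_zero_iff_dvd, not_or]
          exact ⟨⟨by omega, h2d⟩, h3d⟩)]
    exact primeAux_of_prime x hx hp 5 le_rfl

theorem prime_ge_two {x : Int} (h : prime x = true) : 2 ≤ x := by
  unfold prime at h
  split_ifs at h with h1 h2
  · simp only [Bool.or_eq_true, beq_iff_eq] at h1
    omega
  · simp only [Bool.or_eq_true, decide_eq_true_eq, not_or] at h2
    omega

-- the recursion measure decreases on the first child (split off a prime chunk)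
theorem child1_measure {n j : Int} (hj : 1 ≤ j) (hjn : j ≤ n)
    (hr : 2 ≤ PySem.Int.mod n j) :
    (2 * PySem.Int.floordiv n j - 10).toNat < (2 * n - j).toNat := by
  have hid := PySem.Int.floordiv_mul_add_mod n j
  have hrlt : PySem.Int.mod n j < j := PySem.Int.mod_lt n (by omega)
  have hj3 : 3 ≤ j := by omega
  have hq0 : 0 ≤ PySem.Int.floordiv n j :=
    (PySem.Int.le_floordiv_iff_mul_le (a := n) (q := 0) (by omega)).mpr (by omega)
  have hmul : 3 * PySem.Int.floordiv n j ≤ PySem.Int.floordiv n j * j := by nlinarith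
  have hn : 3 * PySem.Int.floordiv n j + 2 ≤ n := by linarith
  omega

-- and on the second child (shift the split point)
theorem child2_measure {n j : Int} (hj : 1 ≤ j) (hjn : j ≤ n) :
    (2 * n - j * 10).toNat < (2 * n - j).toNat := by
  omega

-- fuel-stability and nums-irrelevance of port A, in one lemma
theorem recDivA_stable : ∀ (f1 f2 : Nat) (n : Int) (nums1 nums2 : List Int) (p j : Int),
    1 ≤ j → (2 * n - j).toNat < f1 → (2 * n - j).toNat < f2 →
    recDivA f1 n nums1 p j = recDivA f2 n nums2 p j := by
  intro f1
  induction f1 with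
  | zero => intro f2 n nums1 nums2 p j hj h1 h2; omega
  | succ f1 ih =>
    intro f2 n nums1 nums2 p j hj h1 h2
    cases f2 with
    | zero => omega
    | succ f2 =>
      simp only [recDivA]
      by_cases hb : (prime n && prime p) = true
      · simp [hb]
      · simp only [hb]
        by_cases hgt : j > n
        · simp [hgt]
        · have hjn : j ≤ n := by omega
          simp only [if_neg hgt]
          by_cases hpm : prime (PySem.Int.mod n j) = true
          · have hr := prime_ge_two hpm
            have hM1 := child1_measure hj hjn hr
            have hM2 := child2_measure hj hjn
            simp only [if_pos hpm]
            rw [ih f2 (PySem.Int.floordiv n j) (PySem.Int.mod n j :: nums1)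
                (PySem.Int.mod n j :: nums2) (p + 1) 10 (by norm_num)
                (by omega) (by omega)]
            cases hrec : recDivA f2 (PySem.Int.floordiv n j)
                (PySem.Int.mod n j :: nums2) (p + 1) 10 with
            | none => rfl
            | some b =>
              cases b with
              | true => rfl
              | false => exact ih f2 n nums1 nums2 p (j * 10) (by omega) (by omega) (by omega)
          · have hM2 := child2_measure hj hjn
            simp only [if_neg hpm]
            exact ih f2 n nums1 nums2 p (j * 10) (by omega) (by omega) (by omega)

theorem recDivA_isSome : ∀ (f : Nat) (n : Int) (nums : List Int) (p j : Int),
    1 ≤ j → (2 * n - j).toNat < f → ∃ b, recDivA f n nums p j = some b := by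
  intro f
  induction f with
  | zero => intro n nums p j hj h1; omega
  | succ f ih =>
    intro n nums p j hj h1
    simp only [recDivA]
    by_cases hb : (prime n && prime p) = true
    · exact ⟨true, by simp [hb]⟩
    · simp only [hb]
      by_cases hgt : j > n
      · exact ⟨false, by simp [hgt]⟩
      · have hjn : j ≤ n := by omega
        simp only [if_neg hgt]
        by_cases hpm : prime (PySem.Int.mod n j) = true
        · have hr := prime_ge_two hpm
          have hM1 := child1_measure hj hjn hr
          have hM2 := child2_measure hj hjn
          simp only [if_pos hpm]
          obtain ⟨b1, hb1⟩ := ih (PySem.Int.floordiv n j) (PySem.Int.mod n j :: nums)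
              (p + 1) 10 (by norm_num) (by omega)
          rw [hb1]
          cases b1 with
          | true => exact ⟨true, rfl⟩
          | false => exact ih n nums p (j * 10) (by omega) (by omega)
        · simp only [if_neg hpm]
          exact ih n nums p (j * 10) (by omega) (by omega)

-- the fuel-free value of A on terminating states
def valA (n p j : Int) : Bool :=
  (recDivA ((2 * n - j).toNat + 1) n [] p j).getD false

theorem recDivA_eq_valA {f : Nat} {n : Int} (nums : List Int) {p j : Int}
    (hj : 1 ≤ j) (hf : (2 * n - j).toNat < f) :
    recDivA f n nums p j = some (valA n p j) := by
  obtain ⟨b, hb⟩ := recDivA_isSome ((2 * n - j).toNat + 1) n [] p j hj (by omega)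
  have hst := recDivA_stable f ((2 * n - j).toNat + 1) n nums [] p j hj hf (by omega)
  rw [hst, hb]
  simp [valA, hb]

theorem valA_unfold {n p j : Int} (hj : 1 ≤ j) :
    valA n p j =
      if prime n && prime p then true
      else if j > n then false
      else if prime (PySem.Int.mod n j) then
        (if valA (PySem.Int.floordiv n j) (p + 1) 10 then true else valA n p (j * 10))
      else valA n p (j * 10) := by
  have hself : recDivA ((2 * n - j).toNat + 1) n [] p j = some (valA n p j) :=
    recDivA_eq_valA [] hj (by omega)
  rw [valA, show (2 * n - j).toNat + 1 = (2 * n - j).toNat + 1 from rfl]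
  simp only [recDivA]
  by_cases hb : (prime n && prime p) = true
  · simp [hb]
  · simp only [hb]
    by_cases hgt : j > n
    · simp [hgt]
    · have hjn : j ≤ n := by omega
      simp only [if_neg hgt]
      by_cases hpm : prime (PySem.Int.mod n j) = true
      · have hr := prime_ge_two hpm
        have hM1 := child1_measure hj hjn hr
        have hM2 := child2_measure hj hjn
        simp only [if_pos hpm]
        rw [recDivA_eq_valA (n := PySem.Int.floordiv n j) [PySem.Int.mod n j]
            (by norm_num) (f := (2 * n - j).toNat) (by omega)]
        cases hv : valA (PySem.Int.floordiv n j) (p + 1) 10 with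
        | true => simp
        | false =>
          rw [recDivA_eq_valA (n := n) [] (by omega : (1:Int) ≤ j * 10)
              (f := (2 * n - j).toNat) (by omega)]
          simp
      · have hM2 := child2_measure hj hjn
        simp only [if_neg hpm]
        rw [recDivA_eq_valA (n := n) [] (by omega : (1:Int) ≤ j * 10)
            (f := (2 * n - j).toNat) (by omega)]
        simp

-- every cache entry is the true value of its state
def cacheOK (c : PySem.Dict (Int × Int × Int) Bool) : Prop :=
  ∀ n p j v, PySem.Dict.get? c (n, p, j) = some v → 1 ≤ j ∧ v = valA n p j

theorem cacheOK_insert {c : PySem.Dict (Int × Int × Int) Bool} {n p j : Int} {v : Bool}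
    (hc : cacheOK c) (hj : 1 ≤ j) (hv : v = valA n p j) :
    cacheOK (c.insert (n, p, j) v) := by
  intro n' p' j' v' h
  rw [PySem.Dict.get?_insert] at h
  by_cases he : ((n', p', j') : Int × Int × Int) = (n, p, j)
  · rw [if_pos he] at h
    simp only [Prod.mk.injEq] at he
    obtain ⟨h1, h2, h3⟩ := he
    subst h1; subst h2; subst h3
    cases h
    exact ⟨hj, hv⟩
  · rw [if_neg he] at h
    exact hc n' p' j' v' h

theorem goB_correct : ∀ (f : Nat) (c : PySem.Dict (Int × Int × Int) Bool) (n p j : Int),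
    1 ≤ j → (2 * n - j).toNat < f → cacheOK c →
    ∃ c', goB f c n p j = some (valA n p j, c') ∧ cacheOK c' := by
  intro f
  induction f with
  | zero => intro c n p j hj h1 hc; omega
  | succ f ih =>
    intro c n p j hj h1 hc
    simp only [goB]
    cases hget : PySem.Dict.get? c (n, p, j) with
    | some v =>
      obtain ⟨_, hv⟩ := hc n p j v hget
      exact ⟨c, by rw [hv], hc⟩
    | none =>
      by_cases hb : (prime n && prime p) = true
      · refine ⟨c.insert (n, p, j) true, ?_, cacheOK_insert hc hj ?_⟩
        · simp [hb, valA_unfold hj]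
        · rw [valA_unfold hj, if_pos hb]
      · by_cases hgt : j > n
        · refine ⟨c.insert (n, p, j) false, ?_, cacheOK_insert hc hj ?_⟩
          · simp [hb, hgt, valA_unfold hj]
          · rw [valA_unfold hj, if_neg hb, if_pos hgt]
        · have hjn : j ≤ n := by omega
          have hval : valA n p j =
              if prime (PySem.Int.mod n j) = true then
                (if valA (PySem.Int.floordiv n j) (p + 1) 10 then true
                 else valA n p (j * 10))
              else valA n p (j * 10) := by
            rw [valA_unfold hj, if_neg hb, if_neg hgt]
          by_cases hpm : prime (PySem.Int.mod n j) = true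
          · have hr := prime_ge_two hpm
            have hM1 := child1_measure hj hjn hr
            have hM2 := child2_measure hj hjn
            simp only [hb, if_neg hgt, if_pos hpm]
            obtain ⟨c1, hc1, hok1⟩ := ih c (PySem.Int.floordiv n j) (p + 1) 10
                (by norm_num) (by omega) hc
            rw [hc1]
            cases hv1 : valA (PySem.Int.floordiv n j) (p + 1) 10 with
            | true =>
              refine ⟨c1.insert (n, p, j) true, ?_, cacheOK_insert hok1 hj ?_⟩
              · simp [hv1, hval, hpm]
              · rw [hval, if_pos hpm, hv1]
                simp
            | false =>
              obtain ⟨c2, hc2, hok2⟩ := ih c1 n p (j * 10) (by omega) (by omega) hok1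
              refine ⟨c2.insert (n, p, j) (valA n p (j * 10)), ?_,
                  cacheOK_insert hok2 hj ?_⟩
              · simp [hv1, hc2, hval, hpm]
              · rw [hval, if_pos hpm, hv1]
                simp
          · have hM2 := child2_measure hj hjn
            simp only [hb, if_neg hgt, if_neg hpm]
            obtain ⟨c2, hc2, hok2⟩ := ih c n p (j * 10) (by omega) (by omega) hc
            refine ⟨c2.insert (n, p, j) (valA n p (j * 10)), ?_,
                cacheOK_insert hok2 hj ?_⟩
            · simp [hc2, hval, hpm]
            · rw [hval, if_neg hpm]

theorem cacheOK_empty : cacheOK PySem.Dict.empty := by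
  intro n p j v h
  simp [PySem.Dict.get?_empty] at h

-- ===== VERDICT (by name: the statement is the Claim_ definition above) =====
theorem rec_div_spec : Claim_equal_rec_div := by
  intro num nums pieces i hDom hPre
  show rec_div num nums pieces i = rec_div_alt num nums pieces i
  simp only [Dom_rec_div, Bool.and_eq_true, pvDomInt, decide_eq_true_eq] at hDom
  obtain ⟨⟨⟨hnum, _⟩, _⟩, hi'⟩ := hDom
  by_cases hi : 1 ≤ i
  · have hF : (2 * num - i).toNat < pvFuel := by
      have : pvFuel = 8589934592 := by norm_num [pvFuel]
      omega
    unfold rec_div rec_div_alt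
    rw [recDivA_eq_valA nums hi hF]
    obtain ⟨c', hc', _⟩ := goB_correct pvFuel PySem.Dict.empty num pieces i hi hF cacheOK_empty
    rw [hc']
    simp
  · have hF : pvFuel = 8589934591 + 1 := by norm_num [pvFuel]
    by_cases hb : (prime num && prime pieces) = true
    · unfold rec_div rec_div_alt
      rw [hF]
      simp [recDivA, goB, hb, PySem.Dict.get?_empty]
    · have hlt : num < i := by
        rcases hPre with h | h | h
        · omega
        · exact absurd (by simp [prime_of_prime h.1 h.2.1, prime_of_prime h.2.2.1 h.2.2.2]) hb
        · exact h
      unfold rec_div rec_div_alt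
      rw [hF]
      simp [recDivA, goB, hb, PySem.Dict.get?_empty, hlt]
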